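-- pv_equiv track=rewrite | github.com/manhar-zxcv/Logic-Engine | Check.py | checkFormatProp
-- ===== SOURCE A (Python) =====
-- from string import ascii_lowercase
--
-- alphabets = set(ascii_lowercase)
--
-- specialSymbolsProp = set('&|#@')
--
-- def checkFormatProp(string):
--     if string[0] in specialSymbolsProp:
--         return 1
--     for i in range(len(string)):
--         if (string[i] in specialSymbolsProp or string[i] == '(') and \
--         (i == len(string)-1 or string[i+1] in specialSymbolsProp or string[i+1] == ')'):
--             return 1
--     for i in range(len(string)-1):
--         if (string[i] in alphabets or string[i] == ')') and \
--         (string[i+1] not in specialSymbolsProp and string[i+1] != ')'):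
--             return 1
--     for i in range(len(string)):
--         if string[i] == '~' and (i == len(string)-1 or
--         (string[i+1] not in alphabets and string[i+1] != '(' and string[i+1] != '~')):
--             return 1
--     return 0
-- ===== SOURCE B (Python) =====
-- from string import ascii_lowercase
--
-- # Classify-then-transition: one pass over adjacent category pairs against a
-- # table of forbidden adjacencies; returns 0 on the empty string where A raises.
-- _CAT = {c: 'S' for c in '&|#@'}
-- _CAT['('] = 'O'
-- _CAT[')'] = 'C'
-- _CAT['~'] = 'N'
-- for _c in ascii_lowercase:
--     _CAT[_c] = 'L'
--
-- _BAD = ({(a, b) for a in 'SO' for b in 'SCE'}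
--         | {(a, b) for a in 'LC' for b in 'OLNX'}
--         | {('N', b) for b in 'SCXE'})
--
-- def checkFormatProp(string):
--     cats = [_CAT.get(ch, 'X') for ch in string] + ['E']
--     if cats[0] == 'S':
--         return 1
--     if any(pair in _BAD for pair in zip(cats, cats[1:])):
--         return 1
--     return 0
-- ===== Notes on version B (the rewrite author's own statement) =====
-- stated objective: idiomatic
-- what changed: Replaces A's four separate index-based scans by a classify-then-transition pass: each character is mapped to a category and a single any() over adjacent category pairs (with an end-of-string sentinel) is checked against one table of forbidden adjacencies.
import Mathlib
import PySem

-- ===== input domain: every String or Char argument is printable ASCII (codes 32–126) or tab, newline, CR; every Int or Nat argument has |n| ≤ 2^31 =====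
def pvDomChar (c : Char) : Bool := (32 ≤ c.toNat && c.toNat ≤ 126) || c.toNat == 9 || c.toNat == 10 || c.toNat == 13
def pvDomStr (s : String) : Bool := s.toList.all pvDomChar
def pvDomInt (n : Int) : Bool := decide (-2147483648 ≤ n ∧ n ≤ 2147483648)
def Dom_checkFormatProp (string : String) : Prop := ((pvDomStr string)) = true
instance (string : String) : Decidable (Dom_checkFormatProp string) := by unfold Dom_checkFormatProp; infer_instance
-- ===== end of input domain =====

-- B replaces A's four separate index scans by a classify-then-transition single pass
-- over adjacent category pairs (objective: idiomatic); on "" A raises IndexError, B returns 0.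

-- ===== PORT A =====
def pvIsSpec (c : Char) : Bool := c = '&' || c = '|' || c = '#' || c = '@'
def pvIsLower (c : Char) : Bool := 'a' ≤ c && c ≤ 'z'

def checkFormatProp (string : String) : Int :=
  let s := string.toList
  let n := s.length
  match s with
  | [] => 0   -- Python raises IndexError on string[0]; excluded by Pre_
  | c0 :: _ =>
    if pvIsSpec c0 then 1
    else if (List.range n).any (fun i =>
        (pvIsSpec (s.getD i ' ') || s.getD i ' ' == '(') &&
        (i == n - 1 || pvIsSpec (s.getD (i+1) ' ') || s.getD (i+1) ' ' == ')')) then 1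
    else if (List.range (n - 1)).any (fun i =>
        (pvIsLower (s.getD i ' ') || s.getD i ' ' == ')') &&
        (!pvIsSpec (s.getD (i+1) ' ') && s.getD (i+1) ' ' != ')')) then 1
    else if (List.range n).any (fun i =>
        s.getD i ' ' == '~' && (i == n - 1 ||
          (!pvIsLower (s.getD (i+1) ' ') && s.getD (i+1) ' ' != '(' && s.getD (i+1) ' ' != '~'))) then 1
    else 0

-- ===== PORT B =====
inductive PvCat | S | O | C | L | N | X | E
deriving DecidableEq, Repr

def pvCat (c : Char) : PvCat :=
  if pvIsSpec c then .S
  else if c = '(' then .O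
  else if c = ')' then .C
  else if c = '~' then .N
  else if pvIsLower c then .L
  else .X

def pvBad : PvCat → PvCat → Bool
  | .S, b => b = PvCat.S || b = PvCat.C || b = PvCat.E
  | .O, b => b = PvCat.S || b = PvCat.C || b = PvCat.E
  | .L, b => b = PvCat.O || b = PvCat.L || b = PvCat.N || b = PvCat.X
  | .C, b => b = PvCat.O || b = PvCat.L || b = PvCat.N || b = PvCat.X
  | .N, b => b = PvCat.S || b = PvCat.C || b = PvCat.X || b = PvCat.E
  | .X, _ => false
  | .E, _ => false

def checkFormatProp_alt (string : String) : Int :=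
  let cats := string.toList.map pvCat ++ [PvCat.E]
  match cats with
  | [] => 0   -- unreachable: cats always ends with E
  | c0 :: rest =>
    if c0 = PvCat.S then 1
    else if ((c0 :: rest).zip rest).any (fun p => pvBad p.1 p.2) then 1
    else 0

-- ===== PRECONDITION & SPEC =====
-- Pre_ excludes only the empty string, on which A raises IndexError at string[0] (B returns 0 there).
def Pre_checkFormatProp (string : String) : Prop := string.toList ≠ []
instance (string : String) : Decidable (Pre_checkFormatProp string) := by unfold Pre_checkFormatProp; infer_instance
def pvWitness_checkFormatProp : String := "~p&q"

def Spec_checkFormatProp (string : String) (out : Int) : Prop := out = checkFormatProp_alt string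
instance (string : String) (out : Int) : Decidable (Spec_checkFormatProp string out) := by unfold Spec_checkFormatProp; infer_instance

-- ===== CLAIM (what is proved, stated in full; the proofs are below) =====
def Claim_equal_checkFormatProp : Prop := ∀ (string : String), Dom_checkFormatProp string → Pre_checkFormatProp string → Spec_checkFormatProp string (checkFormatProp string)

-- ===== LEMMAS AND PROOFS =====

theorem pvProfile (c : Char) :
    (pvIsSpec c, c == '(', c == ')', c == '~', pvIsLower c) =
      (match pvCat c with
        | .S => (true, false, false, false, false)
        | .O => (false, true, false, false, false)
        | .C => (false, false, true, false, false)
        | .N => (false, false, false, true, false)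
        | .L => (false, false, false, false, true)
        | .X => (false, false, false, false, false)
        | .E => (false, false, false, false, false)) := by
  have hspec : pvIsSpec c = true → c ≠ '(' ∧ c ≠ ')' ∧ c ≠ '~' ∧ pvIsLower c = false := by
    intro h
    simp only [pvIsSpec, Bool.or_eq_true, decide_eq_true_eq] at h
    rcases h with ((h | h) | h) | h <;> subst h <;> decide
  have hlow : c = '(' ∨ c = ')' ∨ c = '~' → pvIsLower c = false := by
    rintro (h | h | h) <;> subst h <;> decide
  unfold pvCat
  split_ifs with h1 h2 h3 h4 h5
  · obtain ⟨a, b, d, e⟩ := hspec h1; simp_all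
  · have := hlow (Or.inl h2); simp_all
  · have := hlow (Or.inr (Or.inl h3)); simp_all
  · have := hlow (Or.inr (Or.inr h4)); simp_all
  · simp_all
  · simp_all

theorem pvCat_ne_E (c : Char) : pvCat c ≠ PvCat.E := by
  unfold pvCat; split_ifs <;> simp

theorem pair_end (c : Char) : pvBad (pvCat c) .E = ((pvIsSpec c || c == '(') || c == '~') := by
  have h := pvProfile c
  cases hc : pvCat c <;> rw [hc] at h <;> simp [Prod.ext_iff] at h <;>
    simp [pvBad, h.1, h.2.1, h.2.2.1, h.2.2.2.1] <;> decide

theorem pair_mid (c d : Char) :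
    pvBad (pvCat c) (pvCat d) =
      (((pvIsSpec c || c == '(') && (pvIsSpec d || d == ')')) ||
       ((pvIsLower c || c == ')') && (!pvIsSpec d && d != ')')) ||
       (c == '~' && (!pvIsLower d && d != '(' && d != '~'))) := by
  have h := pvProfile c
  have h' := pvProfile d
  cases hc : pvCat c <;> cases hd : pvCat d <;> rw [hc] at h <;> rw [hd] at h' <;>
    simp [Prod.ext_iff] at h h' <;>
    simp [pvBad, h.1, h.2.1, h.2.2.1, h.2.2.2.1, h.2.2.2.2,
          h'.1, h'.2.1, h'.2.2.1, h'.2.2.2.1, h'.2.2.2.2] <;>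
    first
      | decide
      | exact absurd hc (pvCat_ne_E c)
      | exact absurd hd (pvCat_ne_E d)

theorem catS_iff (c : Char) : pvCat c = PvCat.S ↔ pvIsSpec c = true := by
  unfold pvCat; split_ifs <;> simp_all

theorem zip_tail_any {α : Type} (l : List α) (g : α → α → Bool) :
    ((l.zip l.tail).any (fun p => g p.1 p.2) = true) ↔
      ∃ i, ∃ h : i + 1 < l.length, g (l[i]'(by omega)) (l[i+1]'h) = true := by
  rw [List.any_eq_true]
  constructor
  · rintro ⟨p, hp, hgp⟩
    rw [List.mem_iff_getElem] at hp
    obtain ⟨i, hi, hpi⟩ := hp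
    have hlen : i + 1 < l.length := by
      simp [List.length_zip, List.length_tail] at hi; omega
    refine ⟨i, hlen, ?_⟩
    have : p = (l[i]'(by omega), l[i+1]'hlen) := by
      rw [← hpi, List.getElem_zip]
      congr 1
      rw [List.getElem_tail]
    rw [this] at hgp
    exact hgp
  · rintro ⟨i, h, hg⟩
    refine ⟨(l[i]'(by omega), l[i+1]'h), ?_, hg⟩
    rw [List.mem_iff_getElem]
    refine ⟨i, by simp [List.length_zip, List.length_tail]; omega, ?_⟩
    rw [List.getElem_zip]
    congr 1
    rw [List.getElem_tail]

theorem cats_getD_lt (s : List Char) (i : Nat) (hi : i < s.length) :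
    (s.map pvCat ++ [PvCat.E]).getD i PvCat.E = pvCat (s.getD i ' ') := by
  rw [List.getD_eq_getElem _ _ (by simp; omega),
      List.getElem_append_left (by simp [hi]), List.getElem_map,
      List.getD_eq_getElem _ _ hi]

theorem cats_getD_last (s : List Char) :
    (s.map pvCat ++ [PvCat.E]).getD s.length PvCat.E = PvCat.E := by
  rw [List.getD_eq_getElem _ _ (by simp)]
  rw [List.getElem_append_right (by simp)]
  simp

theorem bad_index (s : List Char) (i : Nat) (hi : i < s.length) :
    pvBad ((s.map pvCat ++ [PvCat.E]).getD i PvCat.E) ((s.map pvCat ++ [PvCat.E]).getD (i+1) PvCat.E)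
      = (((pvIsSpec (s.getD i ' ') || s.getD i ' ' == '(') &&
            (i == s.length - 1 || pvIsSpec (s.getD (i+1) ' ') || s.getD (i+1) ' ' == ')')) ||
         (decide (i + 1 < s.length) &&
            ((pvIsLower (s.getD i ' ') || s.getD i ' ' == ')') &&
             (!pvIsSpec (s.getD (i+1) ' ') && s.getD (i+1) ' ' != ')'))) ||
         (s.getD i ' ' == '~' && (i == s.length - 1 ||
            (!pvIsLower (s.getD (i+1) ' ') && s.getD (i+1) ' ' != '(' && s.getD (i+1) ' ' != '~')))) := by
  by_cases h : i + 1 < s.length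
  · have hne : (i == s.length - 1) = false := by simp; omega
    rw [cats_getD_lt s i hi, cats_getD_lt s (i+1) h, pair_mid, hne]
    simp [h]
  · have hi' : i + 1 = s.length := by omega
    have he : (i == s.length - 1) = true := by simp; omega
    rw [cats_getD_lt s i hi, hi', cats_getD_last, pair_end, he]
    simp

theorem key_iff (s : List Char) (_hne : s ≠ []) :
    (pvIsSpec (s.headD ' ') = true
      ∨ ((List.range s.length).any (fun i =>
          (pvIsSpec (s.getD i ' ') || s.getD i ' ' == '(') &&
          (i == s.length - 1 || pvIsSpec (s.getD (i+1) ' ') || s.getD (i+1) ' ' == ')'))) = true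
      ∨ ((List.range (s.length - 1)).any (fun i =>
          (pvIsLower (s.getD i ' ') || s.getD i ' ' == ')') &&
          (!pvIsSpec (s.getD (i+1) ' ') && s.getD (i+1) ' ' != ')'))) = true
      ∨ ((List.range s.length).any (fun i =>
          s.getD i ' ' == '~' && (i == s.length - 1 ||
            (!pvIsLower (s.getD (i+1) ' ') && s.getD (i+1) ' ' != '(' && s.getD (i+1) ' ' != '~')))) = true)
    ↔ (pvCat (s.headD ' ') = PvCat.S
        ∨ (((s.map pvCat ++ [PvCat.E]).zip ((s.map pvCat ++ [PvCat.E]).tail)).any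
             (fun p => pvBad p.1 p.2)) = true) := by
  set cats := s.map pvCat ++ [PvCat.E] with hcats
  have hclen : cats.length = s.length + 1 := by simp [hcats]
  have hB : ((cats.zip cats.tail).any (fun p => pvBad p.1 p.2) = true) ↔
      ∃ i, i < s.length ∧ pvBad (cats.getD i PvCat.E) (cats.getD (i+1) PvCat.E) = true := by
    rw [zip_tail_any]
    constructor
    · rintro ⟨i, h, hg⟩
      refine ⟨i, by omega, ?_⟩
      rwa [List.getD_eq_getElem _ _ (by omega), List.getD_eq_getElem _ _ (by omega)]
    · rintro ⟨i, h, hg⟩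
      refine ⟨i, by omega, ?_⟩
      rwa [List.getD_eq_getElem _ _ (by omega), List.getD_eq_getElem _ _ (by omega)] at hg
  rw [hB]
  have hA1 : ∀ (n : Nat) (f : Nat → Bool), (((List.range n).any f) = true) ↔ ∃ i, i < n ∧ f i = true := by
    intro n f
    rw [List.any_eq_true]
    constructor
    · rintro ⟨i, hi, h⟩; exact ⟨i, List.mem_range.mp hi, h⟩
    · rintro ⟨i, hi, h⟩; exact ⟨i, List.mem_range.mpr hi, h⟩
  rw [hA1, hA1, hA1, catS_iff]
  constructor
  · rintro (h | ⟨i, hi, h⟩ | ⟨i, hi, h⟩ | ⟨i, hi, h⟩)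
    · exact Or.inl h
    · refine Or.inr ⟨i, hi, ?_⟩
      rw [bad_index s i hi]
      simp only [Bool.or_eq_true]
      exact Or.inl (Or.inl h)
    · have hi1 : i + 1 < s.length := by omega
      refine Or.inr ⟨i, by omega, ?_⟩
      rw [bad_index s i (by omega)]
      simp only [Bool.or_eq_true]
      refine Or.inl (Or.inr ?_)
      rw [Bool.and_eq_true, decide_eq_true_eq]
      exact ⟨hi1, h⟩
    · refine Or.inr ⟨i, hi, ?_⟩
      rw [bad_index s i hi]
      simp only [Bool.or_eq_true]
      exact Or.inr h
  · rintro (h | ⟨i, hi, h⟩)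
    · exact Or.inl h
    · rw [bad_index s i hi] at h
      simp only [Bool.or_eq_true] at h
      rcases h with (h | h) | h
      · exact Or.inr (Or.inl ⟨i, hi, h⟩)
      · rw [Bool.and_eq_true, decide_eq_true_eq] at h
        obtain ⟨h1, h2⟩ := h
        exact Or.inr (Or.inr (Or.inl ⟨i, by omega, h2⟩))
      · exact Or.inr (Or.inr (Or.inr ⟨i, hi, h⟩))

theorem pv_main (string : String) (hpre : string.toList ≠ []) :
    checkFormatProp string = checkFormatProp_alt string := by
  unfold checkFormatProp checkFormatProp_alt
  cases hs : string.toList with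
  | nil => exact absurd hs hpre
  | cons c0 t =>
    have hkey := key_iff (c0 :: t) (by simp)
    simp only [List.headD_cons] at hkey
    simp only [List.map_cons, List.cons_append, List.tail_cons] at hkey ⊢
    split_ifs <;> first | rfl | (exfalso; tauto)

-- ===== VERDICT (by name: the statement is the Claim_ definition above) =====
theorem checkFormatProp_spec : Claim_equal_checkFormatProp := by
  intro string _ hpre
  unfold Spec_checkFormatProp
  exact pv_main string hpre
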